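-- pv_equiv track=rewrite | github.com/MaTb3a/Leetcode | 2337-move-pieces-to-obtain-a-string/2337-move-pieces-to-obtain-a-string.py | canChange
-- ===== SOURCE A (Python) =====
-- def canChange(start: str, target: str) -> bool:
--     n = len(start)
--     i = j = 0
--
--     while i < n or j < n:
--         while i < n and start[i] == '_':  # Skip '_' in start
--             i += 1
--         while j < n and target[j] == '_':  # Skip '_' in target
--             j += 1
--
--         # Both strings are fully traversed
--         if i == n and j == n:
--             return True
--
--         # One string finishes early
--         if i == n or j == n or start[i] != target[j]:
--             return False
--
--         # Check constraints for L and R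
--         if start[i] == 'L' and i < j:  # L can only move left
--             return False
--         if start[i] == 'R' and i > j:  # R can only move right
--             return False
--
--         i += 1
--         j += 1
--
--     return True
-- ===== SOURCE B (Python) =====
-- def canChange(start: str, target: str) -> bool:
--     # pieces (ignoring position) must coincide
--     if [c for c in start if c != '_'] != [c for c in target if c != '_']:
--         return False
--     # prefix-counter invariant: every prefix of target must contain at least as many
--     # 'L' as the same prefix of start, and at most as many 'R'
--     dL = dR = 0
--     for a, b in zip(start, target):
--         if b == 'L':
--             dL += 1
--         if a == 'L':
--             dL -= 1
--         if a == 'R':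
--             dR += 1
--         if b == 'R':
--             dR -= 1
--         if dL < 0 or dR < 0:
--             return False
--     return True
-- ===== Notes on version B (the rewrite author's own statement) =====
-- stated objective: alternative
-- what changed: Replaces A's two-pointer piece-by-piece index matching by a counting algorithm: check the underscore-stripped strings are equal, then sweep both strings once keeping two running counters (excess of 'L' in target's prefix over start's, excess of 'R' in start's prefix over target's) that must never go negative; no piece indices are ever compared.
-- outside the precondition, e.g. on canChange('_', '_L'): A returns True, B returns False
import Mathlib
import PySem

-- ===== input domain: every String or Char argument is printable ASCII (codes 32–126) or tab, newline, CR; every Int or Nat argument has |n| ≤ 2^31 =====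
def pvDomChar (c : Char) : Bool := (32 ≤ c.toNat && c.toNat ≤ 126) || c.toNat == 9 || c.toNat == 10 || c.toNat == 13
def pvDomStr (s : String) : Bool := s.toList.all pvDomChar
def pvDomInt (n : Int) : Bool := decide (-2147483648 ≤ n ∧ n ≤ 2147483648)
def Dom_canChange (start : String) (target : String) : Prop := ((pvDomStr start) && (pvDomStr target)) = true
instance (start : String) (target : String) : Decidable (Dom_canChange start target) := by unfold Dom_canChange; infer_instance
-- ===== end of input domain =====

-- B replaces A's two-pointer index-matching scan by a counting algorithm: the stripped
-- strings must be equal and two prefix counters (L-excess of target, R-excess of start)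
-- must never go negative; objective: alternative (no piece indices are compared at all).

-- ===== PORT A =====
-- inner loop `while i < n and s[i] == '_': i += 1`; the Nat fuel (n - i).toNat is only a
-- totality guard and is exactly the number of remaining iterations, so pvSkipA computes
-- precisely what the Python loop computes (indexing is in range on Pre_; pyGetD's default
-- is only reached where Python would raise, which Pre_ excludes)
def pvSkipGo (s : List Char) (n : Int) : Nat → Int → Int
  | 0, i => i
  | fuel + 1, i =>
    if i < n ∧ PySem.List.pyGetD s i ' ' = '_' then pvSkipGo s n fuel (i + 1) else i

def pvSkipA (s : List Char) (n i : Int) : Int := pvSkipGo s n (n - i).toNat i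

-- the outer `while i < n or j < n` loop of A; again the fuel bounds the iteration count
-- (each pass increases i + j by at least 2) and is pure totality bookkeeping
def pvLoopGo (s t : List Char) (n : Int) : Nat → Int → Int → Bool
  | 0, _, _ => true
  | fuel + 1, i, j =>
    if i < n ∨ j < n then
      if pvSkipA s n i = n ∧ pvSkipA t n j = n then true
      else if pvSkipA s n i = n ∨ pvSkipA t n j = n ∨
          PySem.List.pyGetD s (pvSkipA s n i) ' ' ≠ PySem.List.pyGetD t (pvSkipA t n j) ' ' then false
      else if PySem.List.pyGetD s (pvSkipA s n i) ' ' = 'L' ∧ pvSkipA s n i < pvSkipA t n j then false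
      else if PySem.List.pyGetD s (pvSkipA s n i) ' ' = 'R' ∧ pvSkipA t n j < pvSkipA s n i then false
      else pvLoopGo s t n fuel (pvSkipA s n i + 1) (pvSkipA t n j + 1)
    else true

def canChange (start : String) (target : String) : Bool :=
  pvLoopGo start.toList target.toList (PySem.Str.len start)
    ((PySem.Str.len start).toNat + (PySem.Str.len start).toNat) 0 0

-- ===== PORT B =====
-- the `for a, b in zip(start, target)` loop with its four sequential counter updates
-- and the early `return False` when a counter goes negative
def pvCntLoop : List (Char × Char) → Int → Int → Bool
  | [], _, _ => true
  | (a, b) :: rest, dL, dR =>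
    let dL1 := if b = 'L' then dL + 1 else dL
    let dL2 := if a = 'L' then dL1 - 1 else dL1
    let dR1 := if a = 'R' then dR + 1 else dR
    let dR2 := if b = 'R' then dR1 - 1 else dR1
    if dL2 < 0 ∨ dR2 < 0 then false else pvCntLoop rest dL2 dR2

def canChange_alt (start : String) (target : String) : Bool :=
  if start.toList.filter (fun c => c ≠ '_') ≠ target.toList.filter (fun c => c ≠ '_') then false
  else pvCntLoop (start.toList.zip target.toList) 0 0

-- ===== PRECONDITION & SPEC =====
-- the piece list of the suffix of s starting at index k, absolute indices (used to state
-- Pre_'s compatibility condition and as the reference form in the proofs below)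
def pvPcs : List Char → Int → List (Char × Int)
  | [], _ => []
  | c :: cs, k => if c = '_' then pvPcs cs (k + 1) else (c, k) :: pvPcs cs (k + 1)

-- one aligned piece pair is acceptable: same letter, L may only move left, R only right
def pvOKPair (p q : Char × Int) : Prop :=
  p.1 = q.1 ∧ (p.1 = 'L' → q.2 ≤ p.2) ∧ (p.1 = 'R' → p.2 ≤ q.2)

-- target's pieces are a fully acceptable prefix of start's pieces — exactly the shorter-target
-- inputs on which A's scan runs past target's end and raises IndexError
def pvCompat (s t : List Char) : Prop :=
  (pvPcs t 0).length ≤ (pvPcs s 0).length ∧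
    ∀ p ∈ (pvPcs s 0).zip (pvPcs t 0), pvOKPair p.1 p.2

-- Pre_ admits every input on which A returns except target strings longer than start:
-- there A silently compares only the first len(start) characters of target (an artefact of
-- its single bound n = len(start)), which B does not mimic; shorter targets are admitted
-- exactly when A does not raise IndexError (¬ pvCompat).
def Pre_canChange (start : String) (target : String) : Prop :=
  PySem.Str.len start = PySem.Str.len target ∨
    (PySem.Str.len target < PySem.Str.len start ∧ ¬ pvCompat start.toList target.toList)
instance (start : String) (target : String) : Decidable (Pre_canChange start target) := by
  unfold Pre_canChange pvCompat pvOKPair; infer_instance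

def pvWitness_canChange : String × String := ("_L", "L_")

def Spec_canChange (start : String) (target : String) (out : Bool) : Prop := out = canChange_alt start target
instance (start : String) (target : String) (out : Bool) : Decidable (Spec_canChange start target out) := by unfold Spec_canChange; infer_instance

-- ===== CLAIM (what is proved, stated in full; the proofs are below) =====
def Claim_equal_canChange : Prop := ∀ (start : String) (target : String), Dom_canChange start target → Pre_canChange start target → Spec_canChange start target (canChange start target)

-- ===== LEMMAS AND PROOFS =====

-- reference form of the aligned comparison A computes
def pvMatch2 : List (Char × Int) → List (Char × Int) → Bool
  | [], [] => true
  | [], _ :: _ => false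
  | _ :: _, [] => false
  | (c, si) :: S, (d, ti) :: T =>
    if c ≠ d then false
    else if c = 'L' ∧ si < ti then false
    else if c = 'R' ∧ ti < si then false
    else pvMatch2 S T

-- the exact fuel (n - i).toNat makes pvSkipA satisfy the Python loop's unfolding equation
theorem pvSkipA_unfold (s : List Char) (n i : Int) :
    pvSkipA s n i
      = if i < n ∧ PySem.List.pyGetD s i ' ' = '_' then pvSkipA s n (i + 1) else i := by
  unfold pvSkipA
  rcases hf : (n - i).toNat with _ | k
  · rw [pvSkipGo, if_neg (by omega ∘ And.left)]
  · rw [pvSkipGo]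
    by_cases h : i < n ∧ PySem.List.pyGetD s i ' ' = '_'
    · rw [if_pos h, if_pos h, show k = (n - (i + 1)).toNat by omega]
    · rw [if_neg h, if_neg h]

theorem pvSkipA_ge (s : List Char) (n i : Int) : i ≤ pvSkipA s n i := by
  unfold pvSkipA
  generalize (n - i).toNat = fuel
  induction fuel generalizing i with
  | zero => rw [pvSkipGo]
  | succ fuel ih =>
    rw [pvSkipGo]
    by_cases h : i < n ∧ PySem.List.pyGetD s i ' ' = '_'
    · rw [if_pos h]; have := ih (i + 1); omega
    · rw [if_neg h]

theorem pvSkipA_le (s : List Char) (n i : Int) (hle : i ≤ n) : pvSkipA s n i ≤ n := by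
  unfold pvSkipA
  generalize (n - i).toNat = fuel
  induction fuel generalizing i with
  | zero => rw [pvSkipGo]; exact hle
  | succ fuel ih =>
    rw [pvSkipGo]
    by_cases h : i < n ∧ PySem.List.pyGetD s i ' ' = '_'
    · rw [if_pos h]; exact ih (i + 1) (by omega)
    · rw [if_neg h]; exact hle

theorem pvSkipA_stop (s : List Char) (n i : Int) (hlt : pvSkipA s n i < n) :
    ¬ PySem.List.pyGetD s (pvSkipA s n i) ' ' = '_' := by
  rw [pvSkipA_unfold] at hlt ⊢
  by_cases h : i < n ∧ PySem.List.pyGetD s i ' ' = '_'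
  · rw [if_pos h] at hlt ⊢
    exact pvSkipA_stop s n (i + 1) hlt
  · rw [if_neg h] at hlt ⊢
    intro hc; exact h ⟨hlt, hc⟩
termination_by (n - i).toNat
decreasing_by omega

theorem pvPcs_cons (s : List Char) (i : Int) (h0 : 0 ≤ i) (hlt : i < (s.length : Int))
    (hne : PySem.List.pyGetD s i ' ' ≠ '_') :
    pvPcs (s.drop i.toNat) i
      = (PySem.List.pyGetD s i ' ', i) :: pvPcs (s.drop (i.toNat + 1)) (i + 1) := by
  have hi : i.toNat < s.length := by omega
  have hget : PySem.List.pyGetD s i ' ' = s[i.toNat] := PySem.List.pyGetD_eq_getElem _ _ h0 hlt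
  rw [List.drop_eq_getElem_cons hi, pvPcs, hget]
  rw [hget] at hne
  simp [hne]

theorem pvPcs_nil_of_ge (s : List Char) (i : Int) (h : (s.length : Int) ≤ i) :
    pvPcs (s.drop i.toNat) i = [] := by
  rw [List.drop_eq_nil_of_le (by omega)]; rfl

theorem pvPcs_drop_skip (s : List Char) (n i : Int) (h0 : 0 ≤ i) (hn : n = (s.length : Int)) :
    pvPcs (s.drop (pvSkipA s n i).toNat) (pvSkipA s n i)
      = pvPcs (s.drop i.toNat) i := by
  subst hn
  rw [pvSkipA_unfold]
  by_cases h : i < (s.length : Int) ∧ PySem.List.pyGetD s i ' ' = '_'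
  · rw [if_pos h, pvPcs_drop_skip s _ (i + 1) (by omega) rfl]
    obtain ⟨hlt, hc⟩ := h
    have hi : i.toNat < s.length := by omega
    have hget : PySem.List.pyGetD s i ' ' = s[i.toNat] := PySem.List.pyGetD_eq_getElem _ _ h0 hlt
    rw [List.drop_eq_getElem_cons hi, pvPcs]
    rw [hget] at hc
    rw [if_pos hc, show (i + 1).toNat = i.toNat + 1 by omega]
  · rw [if_neg h]
termination_by ((s.length : Int) - i).toNat
decreasing_by omega

theorem pvLoop_eq_match2 (s t : List Char) (hlen : s.length = t.length) (fuel : Nat)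
    (i j : Int) (h0i : 0 ≤ i) (h0j : 0 ≤ j)
    (hin : i ≤ (s.length : Int)) (hjn : j ≤ (s.length : Int))
    (hf : ((s.length : Int) - i).toNat + ((s.length : Int) - j).toNat ≤ fuel) :
    pvLoopGo s t (s.length : Int) fuel i j
      = pvMatch2 (pvPcs (s.drop i.toNat) i) (pvPcs (t.drop j.toNat) j) := by
  have hlen' : (s.length : Int) = (t.length : Int) := by exact_mod_cast congrArg Nat.cast hlen
  induction fuel generalizing i j with
  | zero =>
    rw [pvLoopGo]
    rw [pvPcs_nil_of_ge s i (by omega), pvPcs_nil_of_ge t j (by omega)]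
    rfl
  | succ fuel ih =>
    rw [pvLoopGo]
    by_cases hw : i < (s.length : Int) ∨ j < (s.length : Int)
    · rw [if_pos hw]
      rw [← pvPcs_drop_skip s _ i h0i rfl, ← pvPcs_drop_skip t _ j h0j hlen']
      have hi'le := pvSkipA_le s _ i hin
      have hj'le := pvSkipA_le t _ j hjn
      have hi'ge := pvSkipA_ge s (s.length : Int) i
      have hj'ge := pvSkipA_ge t (s.length : Int) j
      have hi'0 : 0 ≤ pvSkipA s (s.length : Int) i := by omega
      have hj'0 : 0 ≤ pvSkipA t (s.length : Int) j := by omega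
      by_cases h1 : pvSkipA s (s.length : Int) i = (s.length : Int)
          ∧ pvSkipA t (s.length : Int) j = (s.length : Int)
      · rw [if_pos h1]
        rw [pvPcs_nil_of_ge s _ (le_of_eq h1.1.symm), pvPcs_nil_of_ge t _ (by omega)]
        rfl
      · rw [if_neg h1]
        by_cases hi : pvSkipA s (s.length : Int) i = (s.length : Int)
        · have hj : pvSkipA t (s.length : Int) j < (s.length : Int) := by
            rcases lt_or_eq_of_le hj'le with hlt | heq
            · exact hlt
            · exact absurd ⟨hi, heq⟩ h1
          rw [if_pos (Or.inl hi)]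
          rw [pvPcs_nil_of_ge s _ (le_of_eq hi.symm)]
          rw [pvPcs_cons t _ hj'0 (by omega) (pvSkipA_stop t _ j (by omega))]
          rfl
        · have hi' : pvSkipA s (s.length : Int) i < (s.length : Int) := lt_of_le_of_ne hi'le hi
          by_cases hj : pvSkipA t (s.length : Int) j = (s.length : Int)
          · rw [if_pos (Or.inr (Or.inl hj))]
            rw [pvPcs_nil_of_ge t _ (by omega)]
            rw [pvPcs_cons s _ hi'0 hi' (pvSkipA_stop s _ i hi')]
            rfl
          · have hj' : pvSkipA t (s.length : Int) j < (s.length : Int) := lt_of_le_of_ne hj'le hj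
            rw [pvPcs_cons s _ hi'0 hi' (pvSkipA_stop s _ i hi')]
            rw [pvPcs_cons t _ hj'0 (by omega) (pvSkipA_stop t _ j (by omega))]
            by_cases hne : PySem.List.pyGetD s (pvSkipA s (s.length : Int) i) ' '
                ≠ PySem.List.pyGetD t (pvSkipA t (s.length : Int) j) ' '
            · rw [if_pos (Or.inr (Or.inr hne)), pvMatch2, if_pos hne]
            · rw [if_neg (by
                intro hc
                rcases hc with hc | hc | hc
                · exact hi hc
                · exact hj hc
                · exact hne hc)]
              push Not at hne
              rw [pvMatch2, if_neg (show ¬(PySem.List.pyGetD s (pvSkipA s (s.length : Int) i) ' '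
                ≠ PySem.List.pyGetD t (pvSkipA t (s.length : Int) j) ' ') by simp [hne])]
              by_cases h3 : PySem.List.pyGetD s (pvSkipA s (s.length : Int) i) ' ' = 'L'
                  ∧ pvSkipA s (s.length : Int) i < pvSkipA t (s.length : Int) j
              · rw [if_pos h3, if_pos h3]
              · rw [if_neg h3, if_neg h3]
                by_cases h4 : PySem.List.pyGetD s (pvSkipA s (s.length : Int) i) ' ' = 'R'
                    ∧ pvSkipA t (s.length : Int) j < pvSkipA s (s.length : Int) i
                · rw [if_pos h4, if_pos h4]
                · rw [if_neg h4, if_neg h4]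
                  rw [ih _ _ (by omega) (by omega) (by omega) (by omega) (by omega)]
                  rw [show (pvSkipA s (s.length : Int) i).toNat + 1
                      = (pvSkipA s (s.length : Int) i + 1).toNat by omega]
                  rw [show (pvSkipA t (s.length : Int) j).toNat + 1
                      = (pvSkipA t (s.length : Int) j + 1).toNat by omega]
    · rw [if_neg hw]
      push Not at hw
      rw [pvPcs_nil_of_ge s i hw.1, pvPcs_nil_of_ge t j (by omega)]
      rfl

-- reading a char at a nonnegative index ignores an all-space padding suffix
theorem pvGetD_pad (t : List Char) (m : Nat) (j : Int) (h : 0 ≤ j) :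
    PySem.List.pyGetD (t ++ List.replicate m ' ') j ' ' = PySem.List.pyGetD t j ' ' := by
  rw [show j = ((j.toNat : Nat) : Int) by omega, PySem.List.pyGetD_natCast,
    PySem.List.pyGetD_natCast]
  by_cases hk : j.toNat < t.length
  · rw [List.getD_eq_getElem?_getD, List.getD_eq_getElem?_getD,
      List.getElem?_append_left hk]
  · have h1 : t[j.toNat]? = none := List.getElem?_eq_none (by omega)
    rw [List.getD_eq_getElem?_getD, List.getD_eq_getElem?_getD, h1]
    by_cases hk2 : j.toNat < t.length + m
    · have h2 : (t ++ List.replicate m ' ')[j.toNat]? = some ' ' := by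
        rw [List.getElem?_append_right (by omega), List.getElem?_replicate_of_lt (by omega)]
      rw [h2]
      rfl
    · have h2 : (t ++ List.replicate m ' ')[j.toNat]? = none :=
        List.getElem?_eq_none (by simp; omega)
      rw [h2]

theorem pvSkipA_pad (t : List Char) (m : Nat) (n j : Int) (h : 0 ≤ j) :
    pvSkipA (t ++ List.replicate m ' ') n j = pvSkipA t n j := by
  unfold pvSkipA
  generalize (n - j).toNat = fuel
  induction fuel generalizing j with
  | zero => rw [pvSkipGo, pvSkipGo]
  | succ fuel ih =>
    rw [pvSkipGo, pvSkipGo, pvGetD_pad t m j h]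
    by_cases hc : j < n ∧ PySem.List.pyGetD t j ' ' = '_'
    · rw [if_pos hc, if_pos hc]; exact ih (j + 1) (by omega)
    · rw [if_neg hc, if_neg hc]

-- the whole loop of A never looks at the padding either
theorem pvLoopGo_pad (s t : List Char) (m : Nat) (n : Int) (fuel : Nat) (i j : Int)
    (h0j : 0 ≤ j) :
    pvLoopGo s (t ++ List.replicate m ' ') n fuel i j = pvLoopGo s t n fuel i j := by
  induction fuel generalizing i j with
  | zero => rw [pvLoopGo, pvLoopGo]
  | succ fuel ih =>
    rw [pvLoopGo, pvLoopGo, pvSkipA_pad t m n j h0j,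
      pvGetD_pad t m (pvSkipA t n j) (le_trans h0j (pvSkipA_ge t n j))]
    split_ifs <;> first
      | rfl
      | exact ih (pvSkipA s n i + 1) (pvSkipA t n j + 1)
          (by have := pvSkipA_ge t n j; omega)

theorem pvPcs_append (xs ys : List Char) (k : Int) :
    pvPcs (xs ++ ys) k = pvPcs xs k ++ pvPcs ys (k + xs.length) := by
  induction xs generalizing k with
  | nil => simp [pvPcs]
  | cons c cs ih =>
    rw [List.cons_append, pvPcs, pvPcs]
    by_cases h : c = '_'
    · rw [if_pos h, if_pos h, ih, show k + 1 + (cs.length : Int) = k + ((c :: cs).length : Int)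
        by simp; omega]
    · rw [if_neg h, if_neg h, ih, List.cons_append,
        show k + 1 + (cs.length : Int) = k + ((c :: cs).length : Int) by simp; omega]

-- a rejected aligned pair forces pvMatch2 to false, whatever follows the right list
theorem pvMatch2_false_of_badpair (S : List (Char × Int)) :
    ∀ (Q R : List (Char × Int)), (∃ p ∈ S.zip Q, ¬ pvOKPair p.1 p.2) →
      pvMatch2 S (Q ++ R) = false := by
  induction S with
  | nil => intro Q R h; simp at h
  | cons p S ih =>
    intro Q R h
    cases Q with
    | nil => simp at h
    | cons q Q =>
      obtain ⟨c, si⟩ := p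
      obtain ⟨d, ti⟩ := q
      rw [List.cons_append, pvMatch2]
      by_cases h1 : c ≠ d
      · rw [if_pos h1]
      · rw [if_neg h1]
        by_cases h2 : c = 'L' ∧ si < ti
        · rw [if_pos h2]
        · rw [if_neg h2]
          by_cases h3 : c = 'R' ∧ ti < si
          · rw [if_pos h3]
          · rw [if_neg h3]
            apply ih
            rcases h with ⟨pr, hmem, hbad⟩
            rw [List.zip_cons_cons, List.mem_cons] at hmem
            rcases hmem with heq | hmem
            · exfalso
              have hOK : pvOKPair (c, si) (d, ti) := by
                refine ⟨by simpa using h1, ?_, ?_⟩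
                · intro hL
                  have hL' : c = 'L' := hL
                  by_contra hlt
                  have hlt' : ¬ (ti ≤ si) := hlt
                  exact h2 ⟨hL', by omega⟩
                · intro hR
                  have hR' : c = 'R' := hR
                  by_contra hlt
                  have hlt' : ¬ (si ≤ ti) := hlt
                  exact h3 ⟨hR', by omega⟩
              exact hbad (by rw [heq]; exact hOK)
            · exact ⟨pr, hmem, hbad⟩

-- a right list with strictly more pieces forces pvMatch2 to false as well
theorem pvMatch2_false_of_longer (S : List (Char × Int)) :
    ∀ (Q R : List (Char × Int)), S.length < Q.length → pvMatch2 S (Q ++ R) = false := by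
  induction S with
  | nil =>
    intro Q R h
    cases Q with
    | nil => simp at h
    | cons q Q => rw [List.cons_append, pvMatch2]
  | cons p S ih =>
    intro Q R h
    cases Q with
    | nil => simp at h
    | cons q Q =>
      obtain ⟨c, si⟩ := p
      obtain ⟨d, ti⟩ := q
      rw [List.cons_append, pvMatch2]
      by_cases h1 : c ≠ d
      · rw [if_pos h1]
      · rw [if_neg h1]
        by_cases h2 : c = 'L' ∧ si < ti
        · rw [if_pos h2]
        · rw [if_neg h2]
          by_cases h3 : c = 'R' ∧ ti < si
          · rw [if_pos h3]
          · rw [if_neg h3]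
            exact ih Q R (by simpa using h)

-- ========== B-side analysis: the counting algorithm ==========

-- per-character weights of the two counters
def pvEL (a b : Char) : Int := (if b = 'L' then 1 else 0) - (if a = 'L' then 1 else 0)
def pvER (a b : Char) : Int := (if a = 'R' then 1 else 0) - (if b = 'R' then 1 else 0)

-- total counter weight of a processed prefix
def pvWL (l : List (Char × Char)) : Int :=
  (l.countP (fun p => p.2 = 'L') : Int) - (l.countP (fun p => p.1 = 'L') : Int)
def pvWR (l : List (Char × Char)) : Int :=
  (l.countP (fun p => p.1 = 'R') : Int) - (l.countP (fun p => p.2 = 'R') : Int)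

theorem pvCntLoop_cons (a b : Char) (rest : List (Char × Char)) (dL dR : Int) :
    pvCntLoop ((a, b) :: rest) dL dR
      = if dL + pvEL a b < 0 ∨ dR + pvER a b < 0 then false
        else pvCntLoop rest (dL + pvEL a b) (dR + pvER a b) := by
  have hL : (if a = 'L' then (if b = 'L' then dL + 1 else dL) - 1 else (if b = 'L' then dL + 1 else dL))
      = dL + pvEL a b := by unfold pvEL; split_ifs <;> omega
  have hR : (if b = 'R' then (if a = 'R' then dR + 1 else dR) - 1 else (if a = 'R' then dR + 1 else dR))
      = dR + pvER a b := by unfold pvER; split_ifs <;> omega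
  simp only [pvCntLoop]
  rw [hL, hR]

theorem pvWL_nil : pvWL [] = 0 := by simp [pvWL]
theorem pvWR_nil : pvWR [] = 0 := by simp [pvWR]

theorem pvWL_cons (a b : Char) (l : List (Char × Char)) :
    pvWL ((a, b) :: l) = pvEL a b + pvWL l := by
  simp only [pvWL, pvEL, List.countP_cons]
  split_ifs <;> simp_all <;> omega

theorem pvWR_cons (a b : Char) (l : List (Char × Char)) :
    pvWR ((a, b) :: l) = pvER a b + pvWR l := by
  simp only [pvWR, pvER, List.countP_cons]
  split_ifs <;> simp_all <;> omega

-- the loop returns true iff no nonempty prefix drives a counter negative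
theorem pvCntLoop_iff (l : List (Char × Char)) (dL dR : Int) :
    pvCntLoop l dL dR = true
      ↔ ∀ j < l.length, 0 ≤ dL + pvWL (l.take (j + 1)) ∧ 0 ≤ dR + pvWR (l.take (j + 1)) := by
  induction l generalizing dL dR with
  | nil => simp [pvCntLoop]
  | cons p rest ih =>
    obtain ⟨a, b⟩ := p
    rw [pvCntLoop_cons]
    by_cases hviol : dL + pvEL a b < 0 ∨ dR + pvER a b < 0
    · rw [if_pos hviol]
      simp only [Bool.false_eq_true, false_iff]
      intro hall
      have h0 := hall 0 (by simp)
      rw [List.take_succ_cons, List.take_zero, pvWL_cons, pvWR_cons, pvWL_nil, pvWR_nil] at h0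
      omega
    · rw [if_neg hviol, ih]
      constructor
      · intro h j hj
        cases j with
        | zero =>
          rw [List.take_succ_cons, List.take_zero, pvWL_cons, pvWR_cons, pvWL_nil, pvWR_nil]
          omega
        | succ j' =>
          have h2 := h j' (by simpa using hj)
          rw [List.take_succ_cons, pvWL_cons, pvWR_cons]
          omega
      · intro h j hj
        have h2 := h (j + 1) (by simp; omega)
        rw [List.take_succ_cons, pvWL_cons, pvWR_cons] at h2
        omega

-- counting the left components of a zipped prefix counts in the left string
theorem pvZip_countP_fst (c : Char) (s : List Char) :
    ∀ (t : List Char) (n : Nat), n ≤ s.length → n ≤ t.length →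
      ((s.zip t).take n).countP (fun p => p.1 = c) = (s.take n).countP (fun x => x = c) := by
  induction s with
  | nil =>
    intro t n h1 _
    have hn : n = 0 := by simpa using h1
    subst hn; simp
  | cons x xs ih =>
    intro t n h1 h2
    cases t with
    | nil =>
      have hn : n = 0 := by simpa using h2
      subst hn; simp
    | cons y ys =>
      cases n with
      | zero => simp
      | succ n' =>
        rw [List.zip_cons_cons, List.take_succ_cons, List.take_succ_cons,
          List.countP_cons, List.countP_cons, ih ys n' (by simpa using h1) (by simpa using h2)]

theorem pvZip_countP_snd (c : Char) (s : List Char) :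
    ∀ (t : List Char) (n : Nat), n ≤ s.length → n ≤ t.length →
      ((s.zip t).take n).countP (fun p => p.2 = c) = (t.take n).countP (fun x => x = c) := by
  induction s with
  | nil =>
    intro t n h1 _
    have hn : n = 0 := by simpa using h1
    subst hn; simp
  | cons x xs ih =>
    intro t n h1 h2
    cases t with
    | nil =>
      have hn : n = 0 := by simpa using h2
      subst hn; simp
    | cons y ys =>
      cases n with
      | zero => simp
      | succ n' =>
        rw [List.zip_cons_cons, List.take_succ_cons, List.take_succ_cons,
          List.countP_cons, List.countP_cons, ih ys n' (by simpa using h1) (by simpa using h2)]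

-- positions (absolute, offset k) of the occurrences of c
def pvPosC (c : Char) : List Char → Int → List Int
  | [], _ => []
  | x :: xs, k => if x = c then k :: pvPosC c xs (k + 1) else pvPosC c xs (k + 1)

theorem pvPosC_ge (c : Char) (s : List Char) : ∀ (k : Int) (m : Int), m ∈ pvPosC c s k → k ≤ m := by
  induction s with
  | nil => intro k m h; simp [pvPosC] at h
  | cons x xs ih =>
    intro k m h
    rw [pvPosC] at h
    by_cases hx : x = c
    · rw [if_pos hx, List.mem_cons] at h
      rcases h with h | h
      · omega
      · have := ih (k + 1) m h; omega
    · rw [if_neg hx] at h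
      have := ih (k + 1) m h; omega

theorem pvPosC_lt (c : Char) (s : List Char) :
    ∀ (k : Int) (m : Int), m ∈ pvPosC c s k → m < k + s.length := by
  induction s with
  | nil => intro k m h; simp [pvPosC] at h
  | cons x xs ih =>
    intro k m h
    rw [pvPosC] at h
    by_cases hx : x = c
    · rw [if_pos hx, List.mem_cons] at h
      rcases h with h | h
      · simp; omega
      · have := ih (k + 1) m h; simp; omega
    · rw [if_neg hx] at h
      have := ih (k + 1) m h; simp; omega

theorem pvPosC_sorted (c : Char) (s : List Char) :
    ∀ (k : Int), (pvPosC c s k).Pairwise (· < ·) := by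
  induction s with
  | nil => intro k; simp [pvPosC]
  | cons x xs ih =>
    intro k
    rw [pvPosC]
    by_cases hx : x = c
    · rw [if_pos hx, List.pairwise_cons]
      exact ⟨fun m hm => by have := pvPosC_ge c xs (k + 1) m hm; omega, ih (k + 1)⟩
    · rw [if_neg hx]; exact ih (k + 1)

-- prefix counts in the string = how many positions fall below the cut
theorem pvPosC_countP (c : Char) (s : List Char) :
    ∀ (k : Int) (i : Nat),
      (pvPosC c s k).countP (fun z => z < k + (i : Int)) = (s.take i).countP (fun x => x = c) := by
  induction s with
  | nil => intro k i; simp [pvPosC]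
  | cons x xs ih =>
    intro k i
    cases i with
    | zero =>
      simp only [List.take_zero, List.countP_nil]
      rw [List.countP_eq_zero]
      intro m hm
      have := pvPosC_ge c (x :: xs) k m hm
      simp only [Nat.cast_zero, add_zero, decide_eq_true_eq]
      omega
    | succ i' =>
      rw [List.take_succ_cons, List.countP_cons, pvPosC]
      have hpred : (fun z : Int => decide (z < k + ((i' + 1 : Nat) : Int)))
          = (fun z : Int => decide (z < (k + 1) + (i' : Int))) := by
        funext z; rw [decide_eq_decide]; omega
      by_cases hx : x = c
      · rw [if_pos hx, List.countP_cons, hpred, ih (k + 1) i']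
        have h1 : (if decide (k < k + ((i' + 1 : Nat) : Int)) = true then 1 else 0) = 1 := by
          have hk1 : k < k + ((i' + 1 : Nat) : Int) := by push_cast; omega
          simp only [hk1, decide_true, if_true]
        rw [h1]
        simp [hx]
      · rw [if_neg hx, hpred, ih (k + 1) i']
        simp [hx]

def pvSel (c : Char) (p : Char × Int) : Option Int := if p.1 = c then some p.2 else none

theorem pvPosC_eq_filterMap (c : Char) (hc : c ≠ '_') (s : List Char) :
    ∀ (k : Int), pvPosC c s k = (pvPcs s k).filterMap (pvSel c) := by
  induction s with
  | nil => intro k; simp [pvPosC, pvPcs]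
  | cons x xs ih =>
    intro k
    rw [pvPosC, pvPcs]
    by_cases hu : x = '_'
    · have hxc : ¬ x = c := by rw [hu]; intro h; exact hc h.symm
      rw [if_pos hu, if_neg hxc, ih]
    · rw [if_neg hu]
      by_cases hx : x = c
      · rw [if_pos hx,
          List.filterMap_cons_some (show pvSel c (x, k) = some k by simp [pvSel, hx]), ih]
      · rw [if_neg hx,
          List.filterMap_cons_none (show pvSel c (x, k) = none by simp [pvSel, hx]), ih]

-- when the piece letters agree, zipping the c-positions is filtering the zipped pieces
theorem pvZipFilter (c : Char) (S : List (Char × Int)) :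
    ∀ (T : List (Char × Int)), S.map Prod.fst = T.map Prod.fst →
      (S.filterMap (pvSel c)).zip (T.filterMap (pvSel c))
        = (S.zip T).filterMap
            (fun pq => if pq.1.1 = c then some (pq.1.2, pq.2.2) else none) := by
  induction S with
  | nil =>
    intro T h
    have : T = [] := by
      cases T with
      | nil => rfl
      | cons q T' => simp at h
    subst this; simp
  | cons p S' ih =>
    intro T h
    cases T with
    | nil => simp at h
    | cons q T' =>
      obtain ⟨d, si⟩ := p
      obtain ⟨e, ti⟩ := q
      simp only [List.map_cons, List.cons.injEq] at h
      obtain ⟨hde, hmaps⟩ := h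
      rw [List.zip_cons_cons]
      by_cases hdc : d = c
      · have he : e = c := by rw [← hde]; exact hdc
        rw [List.filterMap_cons_some (show pvSel c (d, si) = some si by simp [pvSel, hdc]),
          List.filterMap_cons_some (show pvSel c (e, ti) = some ti by simp [pvSel, he]),
          List.filterMap_cons_some
            (f := fun pq : (Char × Int) × (Char × Int) =>
              if pq.1.1 = c then some (pq.1.2, pq.2.2) else none)
            (b := (si, ti))
            (by simp [hdc]),
          List.zip_cons_cons, ih T' hmaps]
      · have he : ¬ e = c := by rw [← hde]; exact hdc
        rw [List.filterMap_cons_none (show pvSel c (d, si) = none by simp [pvSel, hdc]),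
          List.filterMap_cons_none (show pvSel c (e, ti) = none by simp [pvSel, he]),
          List.filterMap_cons_none
            (f := fun pq : (Char × Int) × (Char × Int) =>
              if pq.1.1 = c then some (pq.1.2, pq.2.2) else none)
            (by simp [hdc]),
          ih T' hmaps]

theorem pvSel_len (c : Char) (S : List (Char × Int)) :
    ∀ (T : List (Char × Int)), S.map Prod.fst = T.map Prod.fst →
      (S.filterMap (pvSel c)).length = (T.filterMap (pvSel c)).length := by
  induction S with
  | nil =>
    intro T h
    cases T with
    | nil => rfl
    | cons q T' => simp at h
  | cons p S' ih =>
    intro T h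
    cases T with
    | nil => simp at h
    | cons q T' =>
      obtain ⟨d, si⟩ := p
      obtain ⟨e, ti⟩ := q
      simp only [List.map_cons, List.cons.injEq] at h
      obtain ⟨hde, hmaps⟩ := h
      by_cases hdc : d = c
      · have he : e = c := by rw [← hde]; exact hdc
        rw [List.filterMap_cons_some (show pvSel c (d, si) = some si by simp [pvSel, hdc]),
          List.filterMap_cons_some (show pvSel c (e, ti) = some ti by simp [pvSel, he])]
        simp [ih T' hmaps]
      · have he : ¬ e = c := by rw [← hde]; exact hdc
        rw [List.filterMap_cons_none (show pvSel c (d, si) = none by simp [pvSel, hdc]),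
          List.filterMap_cons_none (show pvSel c (e, ti) = none by simp [pvSel, he])]
        exact ih T' hmaps

-- pointwise domination gives prefix-count domination (forward direction)
theorem pvCount_mono (p : List Int) :
    ∀ (q : List Int), p.length = q.length → (∀ xy ∈ p.zip q, xy.2 ≤ xy.1) →
      ∀ (i : Int), p.countP (fun z => z < i) ≤ q.countP (fun z => z < i) := by
  induction p with
  | nil => intro q h _ i; simp
  | cons x p' ih =>
    intro q hlen hpt i
    cases q with
    | nil => simp at hlen
    | cons y q' =>
      have hxy : y ≤ x := hpt (x, y) (by rw [List.zip_cons_cons]; exact List.mem_cons_self ..)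
      have hrest := ih q' (by simpa using hlen)
        (fun xy hm => hpt xy (by rw [List.zip_cons_cons]; exact List.mem_cons_of_mem _ hm)) i
      rw [List.countP_cons, List.countP_cons]
      simp only [decide_eq_true_eq]
      split_ifs <;> omega

-- a sorted list has more than k elements below its (k)-th element + 1
theorem pvSorted_count_ge (q : List Int) (hs : q.Pairwise (· < ·)) :
    ∀ (k : Nat) (hk : k < q.length) (v : Int), q[k] = v →
      k < q.countP (fun z => z < v + 1) := by
  induction q with
  | nil => intro k hk; simp at hk
  | cons x q' ih =>
    intro k hk v hv
    rw [List.pairwise_cons] at hs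
    cases k with
    | zero =>
      simp only [List.getElem_cons_zero] at hv
      subst hv
      rw [List.countP_cons]
      simp only [decide_eq_true_eq]
      split_ifs <;> omega
    | succ k' =>
      have hk' : k' < q'.length := by simpa using hk
      simp only [List.getElem_cons_succ] at hv
      have hx : x < v := hv ▸ hs.1 q'[k'] (List.getElem_mem hk')
      have hih := ih hs.2 k' hk' v hv
      rw [List.countP_cons]
      simp only [decide_eq_true_eq]
      split_ifs <;> omega

-- at most k elements of a sorted list lie below a value below its (k)-th element
theorem pvSorted_count_le (q : List Int) (hs : q.Pairwise (· < ·)) :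
    ∀ (k : Nat) (hk : k < q.length) (w v : Int), q[k] = w → v < w →
      q.countP (fun z => z < v + 1) ≤ k := by
  induction q with
  | nil => intro k hk; simp at hk
  | cons x q' ih =>
    intro k hk w v hw hv
    rw [List.pairwise_cons] at hs
    cases k with
    | zero =>
      simp only [List.getElem_cons_zero] at hw
      subst hw
      have h0 : q'.countP (fun z => z < v + 1) = 0 := by
        rw [List.countP_eq_zero]
        intro m hm
        have := hs.1 m hm
        simp only [decide_eq_true_eq]
        omega
      rw [List.countP_cons, h0]
      simp only [decide_eq_true_eq]
      split_ifs <;> omega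
    | succ k' =>
      have hk' : k' < q'.length := by simpa using hk
      simp only [List.getElem_cons_succ] at hw
      have hih := ih hs.2 k' hk' w v hw hv
      rw [List.countP_cons]
      simp only [decide_eq_true_eq]
      split_ifs <;> omega

-- aligned characters coincide when the letter sequences coincide
theorem pvZip_fst_eq (S : List (Char × Int)) :
    ∀ (T : List (Char × Int)), S.map Prod.fst = T.map Prod.fst →
      ∀ pq ∈ S.zip T, pq.1.1 = pq.2.1 := by
  induction S with
  | nil => intro T _ pq hm; simp at hm
  | cons p S' ih =>
    intro T h pq hm
    cases T with
    | nil => simp at hm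
    | cons q T' =>
      simp only [List.map_cons, List.cons.injEq] at h
      rw [List.zip_cons_cons, List.mem_cons] at hm
      rcases hm with hm | hm
      · subst hm; exact h.1
      · exact ih T' h.2 pq hm

-- characterisation of A's reference comparison
theorem pvMatch2_iff (S : List (Char × Int)) :
    ∀ (T : List (Char × Int)),
      pvMatch2 S T = true
        ↔ S.map Prod.fst = T.map Prod.fst ∧ ∀ pq ∈ S.zip T, pvOKPair pq.1 pq.2 := by
  induction S with
  | nil =>
    intro T
    cases T with
    | nil => simp [pvMatch2]
    | cons q T' => simp [pvMatch2]
  | cons p S' ih =>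
    intro T
    cases T with
    | nil => simp [pvMatch2]
    | cons q T' =>
      obtain ⟨c, si⟩ := p
      obtain ⟨d, ti⟩ := q
      rw [pvMatch2]
      by_cases h1 : c ≠ d
      · rw [if_pos h1]
        simp only [Bool.false_eq_true, false_iff]
        intro hc
        have h := hc.1
        simp only [List.map_cons, List.cons.injEq] at h
        exact h1 h.1
      · push Not at h1
        rw [if_neg (by simp [h1])]
        by_cases h2 : c = 'L' ∧ si < ti
        · rw [if_pos h2]
          simp only [Bool.false_eq_true, false_iff]
          intro hc
          have hOK := hc.2 ((c, si), (d, ti))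
            (by rw [List.zip_cons_cons]; exact List.mem_cons_self ..)
          have := hOK.2.1 h2.1
          simp at this
          omega
        · rw [if_neg h2]
          by_cases h3 : c = 'R' ∧ ti < si
          · rw [if_pos h3]
            simp only [Bool.false_eq_true, false_iff]
            intro hc
            have hOK := hc.2 ((c, si), (d, ti))
              (by rw [List.zip_cons_cons]; exact List.mem_cons_self ..)
            have := hOK.2.2 h3.1
            simp at this
            omega
          · rw [if_neg h3, ih T']
            constructor
            · intro hc
              refine ⟨?_, ?_⟩
              · simp only [List.map_cons, List.cons.injEq]
                exact ⟨h1, hc.1⟩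
              intro pq hm
              rw [List.zip_cons_cons, List.mem_cons] at hm
              rcases hm with hm | hm
              · subst hm
                refine ⟨h1, fun hL => ?_, fun hR => ?_⟩
                · simp only
                  have : ¬ si < ti := fun hlt => h2 ⟨hL, hlt⟩
                  omega
                · simp only
                  have : ¬ ti < si := fun hlt => h3 ⟨hR, hlt⟩
                  omega
              · exact hc.2 pq hm
            · intro hc
              refine ⟨?_, ?_⟩
              · have h := hc.1
                simp only [List.map_cons, List.cons.injEq] at h
                exact h.2
              intro pq hm
              exact hc.2 pq (by rw [List.zip_cons_cons]; exact List.mem_cons_of_mem _ hm)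

-- piece letters are exactly the stripped string
theorem pvMap_fst_pcs (s : List Char) :
    ∀ (k : Int), (pvPcs s k).map Prod.fst = s.filter (fun c => c ≠ '_') := by
  induction s with
  | nil => intro k; simp [pvPcs]
  | cons x xs ih =>
    intro k
    rw [pvPcs, List.filter_cons]
    by_cases h : x = '_'
    · rw [if_pos h]
      simpa [h] using ih (k + 1)
    · rw [if_neg h]
      simpa [h] using ih (k + 1)

-- a violated pair makes the counter loop fail
theorem pvCnt_false_of_bad (s t : List Char)
    (hmap : (pvPcs s 0).map Prod.fst = (pvPcs t 0).map Prod.fst)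
    (pq : (Char × Int) × (Char × Int)) (hmem : pq ∈ (pvPcs s 0).zip (pvPcs t 0))
    (hbad : ¬ pvOKPair pq.1 pq.2) :
    pvCntLoop (s.zip t) 0 0 = false := by
  obtain ⟨⟨c, si⟩, ⟨d, ti⟩⟩ := pq
  have hcd : c = d := pvZip_fst_eq _ _ hmap _ hmem
  have hviol : (c = 'L' ∧ si < ti) ∨ (c = 'R' ∧ ti < si) := by
    unfold pvOKPair at hbad
    by_cases hL : c = 'L' ∧ si < ti
    · exact Or.inl hL
    by_cases hR : c = 'R' ∧ ti < si
    · exact Or.inr hR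
    exfalso
    push Not at hL hR
    apply hbad
    refine ⟨hcd, fun h => ?_, fun h => ?_⟩
    · have := hL h
      simp only
      omega
    · have := hR h
      simp only
      omega
  cases hb : pvCntLoop (s.zip t) 0 0
  · rfl
  · exfalso
    have hall := (pvCntLoop_iff _ 0 0).mp hb
    rcases hviol with ⟨hc, hlt⟩ | ⟨hc, hlt⟩
    · -- L case: violation at prefix si + 1
      have hmemL : (si, ti) ∈ (pvPosC 'L' s 0).zip (pvPosC 'L' t 0) := by
        rw [pvPosC_eq_filterMap 'L' (by decide) s 0, pvPosC_eq_filterMap 'L' (by decide) t 0,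
          pvZipFilter 'L' _ _ hmap, List.mem_filterMap]
        exact ⟨((c, si), (d, ti)), hmem, by simp [hc]⟩
      obtain ⟨k, hk, hkeq⟩ := List.getElem_of_mem hmemL
      rw [List.getElem_zip] at hkeq
      have hps : (pvPosC 'L' s 0)[k]'(by rw [List.length_zip] at hk; omega) = si := by
        have := congrArg Prod.fst hkeq; simpa using this
      have hpt : (pvPosC 'L' t 0)[k]'(by rw [List.length_zip] at hk; omega) = ti := by
        have := congrArg Prod.snd hkeq; simpa using this
      have hsi0 : 0 ≤ si := by
        have : si ∈ pvPosC 'L' s 0 := hps ▸ List.getElem_mem _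
        exact pvPosC_ge 'L' s 0 si this
      have hsilt : si < (s.length : Int) := by
        have : si ∈ pvPosC 'L' s 0 := hps ▸ List.getElem_mem _
        have := pvPosC_lt 'L' s 0 si this; omega
      have htilt : ti < (t.length : Int) := by
        have : ti ∈ pvPosC 'L' t 0 := hpt ▸ List.getElem_mem _
        have := pvPosC_lt 'L' t 0 ti this; omega
      set j : Nat := si.toNat with hj
      have hjlen : j < (s.zip t).length := by rw [List.length_zip]; omega
      have hcond := (hall j hjlen).1
      rw [pvWL] at hcond
      have h1 : ((s.zip t).take (j + 1)).countP (fun p => p.1 = 'L')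
          = (s.take (j + 1)).countP (fun x => x = 'L') :=
        pvZip_countP_fst 'L' s t (j + 1) (by omega) (by omega)
      have h2 : ((s.zip t).take (j + 1)).countP (fun p => p.2 = 'L')
          = (t.take (j + 1)).countP (fun x => x = 'L') :=
        pvZip_countP_snd 'L' s t (j + 1) (by omega) (by omega)
      have h3 := pvPosC_countP 'L' s 0 (j + 1)
      have h4 := pvPosC_countP 'L' t 0 (j + 1)
      have hcast : (0 : Int) + ((j + 1 : Nat) : Int) = si + 1 := by push_cast; omega
      rw [hcast] at h3 h4
      have h5 : k < (pvPosC 'L' s 0).countP (fun z => z < si + 1) := by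
        have hkp : k < (pvPosC 'L' s 0).length := by rw [List.length_zip] at hk; omega
        exact pvSorted_count_ge (pvPosC 'L' s 0) (pvPosC_sorted 'L' s 0) k hkp si hps
      have h6 : (pvPosC 'L' t 0).countP (fun z => z < si + 1) ≤ k := by
        have hkq : k < (pvPosC 'L' t 0).length := by rw [List.length_zip] at hk; omega
        exact pvSorted_count_le (pvPosC 'L' t 0) (pvPosC_sorted 'L' t 0) k hkq ti si hpt hlt
      rw [h1, h2] at hcond
      omega
    · -- R case: violation at prefix ti + 1
      have hmemR : (si, ti) ∈ (pvPosC 'R' s 0).zip (pvPosC 'R' t 0) := by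
        rw [pvPosC_eq_filterMap 'R' (by decide) s 0, pvPosC_eq_filterMap 'R' (by decide) t 0,
          pvZipFilter 'R' _ _ hmap, List.mem_filterMap]
        exact ⟨((c, si), (d, ti)), hmem, by simp [hc]⟩
      obtain ⟨k, hk, hkeq⟩ := List.getElem_of_mem hmemR
      rw [List.getElem_zip] at hkeq
      have hps : (pvPosC 'R' s 0)[k]'(by rw [List.length_zip] at hk; omega) = si := by
        have := congrArg Prod.fst hkeq; simpa using this
      have hpt : (pvPosC 'R' t 0)[k]'(by rw [List.length_zip] at hk; omega) = ti := by
        have := congrArg Prod.snd hkeq; simpa using this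
      have hti0 : 0 ≤ ti := by
        have : ti ∈ pvPosC 'R' t 0 := hpt ▸ List.getElem_mem _
        exact pvPosC_ge 'R' t 0 ti this
      have hsilt : si < (s.length : Int) := by
        have : si ∈ pvPosC 'R' s 0 := hps ▸ List.getElem_mem _
        have := pvPosC_lt 'R' s 0 si this; omega
      have htilt : ti < (t.length : Int) := by
        have : ti ∈ pvPosC 'R' t 0 := hpt ▸ List.getElem_mem _
        have := pvPosC_lt 'R' t 0 ti this; omega
      set j : Nat := ti.toNat with hj
      have hjlen : j < (s.zip t).length := by rw [List.length_zip]; omega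
      have hcond := (hall j hjlen).2
      rw [pvWR] at hcond
      have h1 : ((s.zip t).take (j + 1)).countP (fun p => p.1 = 'R')
          = (s.take (j + 1)).countP (fun x => x = 'R') :=
        pvZip_countP_fst 'R' s t (j + 1) (by omega) (by omega)
      have h2 : ((s.zip t).take (j + 1)).countP (fun p => p.2 = 'R')
          = (t.take (j + 1)).countP (fun x => x = 'R') :=
        pvZip_countP_snd 'R' s t (j + 1) (by omega) (by omega)
      have h3 := pvPosC_countP 'R' s 0 (j + 1)
      have h4 := pvPosC_countP 'R' t 0 (j + 1)
      have hcast : (0 : Int) + ((j + 1 : Nat) : Int) = ti + 1 := by push_cast; omega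
      rw [hcast] at h3 h4
      have h5 : k < (pvPosC 'R' t 0).countP (fun z => z < ti + 1) := by
        have hkp : k < (pvPosC 'R' t 0).length := by rw [List.length_zip] at hk; omega
        exact pvSorted_count_ge (pvPosC 'R' t 0) (pvPosC_sorted 'R' t 0) k hkp ti hpt
      have h6 : (pvPosC 'R' s 0).countP (fun z => z < ti + 1) ≤ k := by
        have hkq : k < (pvPosC 'R' s 0).length := by rw [List.length_zip] at hk; omega
        exact pvSorted_count_le (pvPosC 'R' s 0) (pvPosC_sorted 'R' s 0) k hkq si ti hps hlt
      rw [h1, h2] at hcond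
      omega

-- all pairs acceptable (and equal lengths) make the counter loop succeed
theorem pvCnt_true_of_ok (s t : List Char) (hlen : s.length = t.length)
    (hmap : (pvPcs s 0).map Prod.fst = (pvPcs t 0).map Prod.fst)
    (hok : ∀ pq ∈ (pvPcs s 0).zip (pvPcs t 0), pvOKPair pq.1 pq.2) :
    pvCntLoop (s.zip t) 0 0 = true := by
  rw [pvCntLoop_iff]
  intro j hj
  rw [List.length_zip] at hj
  have hjs : j + 1 ≤ s.length := by omega
  have hjt : j + 1 ≤ t.length := by omega
  have hzipL : (pvPosC 'L' s 0).zip (pvPosC 'L' t 0)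
      = ((pvPcs s 0).zip (pvPcs t 0)).filterMap
          (fun pq => if pq.1.1 = 'L' then some (pq.1.2, pq.2.2) else none) := by
    rw [pvPosC_eq_filterMap 'L' (by decide) s 0, pvPosC_eq_filterMap 'L' (by decide) t 0]
    exact pvZipFilter 'L' _ _ hmap
  have hzipR : (pvPosC 'R' s 0).zip (pvPosC 'R' t 0)
      = ((pvPcs s 0).zip (pvPcs t 0)).filterMap
          (fun pq => if pq.1.1 = 'R' then some (pq.1.2, pq.2.2) else none) := by
    rw [pvPosC_eq_filterMap 'R' (by decide) s 0, pvPosC_eq_filterMap 'R' (by decide) t 0]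
    exact pvZipFilter 'R' _ _ hmap
  constructor
  · -- L counter
    rw [pvWL, pvZip_countP_fst 'L' s t (j + 1) hjs hjt, pvZip_countP_snd 'L' s t (j + 1) hjs hjt,
      ← pvPosC_countP 'L' s 0 (j + 1), ← pvPosC_countP 'L' t 0 (j + 1)]
    have hmono := pvCount_mono (pvPosC 'L' s 0) (pvPosC 'L' t 0)
      (by
        rw [pvPosC_eq_filterMap 'L' (by decide) s 0, pvPosC_eq_filterMap 'L' (by decide) t 0]
        exact pvSel_len 'L' _ _ hmap)
      (by
        intro xy hm
        rw [hzipL, List.mem_filterMap] at hm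
        obtain ⟨pq, hpq, hsel⟩ := hm
        have hOK := hok pq hpq
        by_cases hL : pq.1.1 = 'L'
        · rw [if_pos hL] at hsel
          have hxy2 := Option.some.inj hsel
          rw [← hxy2]
          exact hOK.2.1 hL
        · rw [if_neg hL] at hsel; exact absurd hsel (by simp))
      (0 + ((j + 1 : Nat) : Int))
    omega
  · -- R counter
    rw [pvWR, pvZip_countP_fst 'R' s t (j + 1) hjs hjt, pvZip_countP_snd 'R' s t (j + 1) hjs hjt,
      ← pvPosC_countP 'R' s 0 (j + 1), ← pvPosC_countP 'R' t 0 (j + 1)]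
    have hmono := pvCount_mono (pvPosC 'R' t 0) (pvPosC 'R' s 0)
      (by
        rw [pvPosC_eq_filterMap 'R' (by decide) s 0, pvPosC_eq_filterMap 'R' (by decide) t 0]
        exact (pvSel_len 'R' _ _ hmap).symm)
      (by
        intro xy hm
        have hswap := List.zip_swap (pvPosC 'R' s 0) (pvPosC 'R' t 0)
        rw [← hswap, List.mem_map] at hm
        obtain ⟨⟨a, b⟩, hab, habe⟩ := hm
        have hxa : xy = (b, a) := by rw [← habe]; rfl
        subst hxa
        rw [hzipR, List.mem_filterMap] at hab
        obtain ⟨pq, hpq, hsel⟩ := hab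
        have hOK := hok pq hpq
        by_cases hR : pq.1.1 = 'R'
        · rw [if_pos hR] at hsel
          have h2 := Option.some.inj hsel
          have ha : pq.1.2 = a := by rw [show a = (a, b).1 from rfl, ← h2]
          have hb : pq.2.2 = b := by rw [show b = (a, b).2 from rfl, ← h2]
          show a ≤ b
          rw [← ha, ← hb]
          exact hOK.2.2 hR
        · rw [if_neg hR] at hsel; exact absurd hsel (by simp))
      (0 + ((j + 1 : Nat) : Int))
    omega

-- B equals A's reference comparison on equal-length strings
theorem pvAltEq (start target : String) (hlen : start.toList.length = target.toList.length) :
    canChange_alt start target = pvMatch2 (pvPcs start.toList 0) (pvPcs target.toList 0) := by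
  unfold canChange_alt
  by_cases hf : start.toList.filter (fun c => c ≠ '_') = target.toList.filter (fun c => c ≠ '_')
  · rw [if_neg (show ¬ _ ≠ _ by simp only [ne_eq, not_not]; exact hf)]
    have hmap : (pvPcs start.toList 0).map Prod.fst = (pvPcs target.toList 0).map Prod.fst := by
      rw [pvMap_fst_pcs, pvMap_fst_pcs]; exact hf
    cases hm : pvMatch2 (pvPcs start.toList 0) (pvPcs target.toList 0)
    · -- A's reference form is false: some pair is violated
      have hnot : ¬ (pvMatch2 (pvPcs start.toList 0) (pvPcs target.toList 0) = true) := by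
        rw [hm]; simp
      rw [pvMatch2_iff] at hnot
      push Not at hnot
      have hbad := hnot hmap
      obtain ⟨pq, hmem, hb⟩ := hbad
      exact pvCnt_false_of_bad start.toList target.toList hmap pq hmem hb
    · have hok := ((pvMatch2_iff _ _).mp hm).2
      exact pvCnt_true_of_ok start.toList target.toList hlen hmap hok
  · rw [if_pos hf]
    cases hm : pvMatch2 (pvPcs start.toList 0) (pvPcs target.toList 0)
    · rfl
    · exfalso
      have hmap := ((pvMatch2_iff _ _).mp hm).1
      rw [pvMap_fst_pcs, pvMap_fst_pcs] at hmap
      exact hf hmap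

-- B answers false whenever the compatibility condition fails
theorem pvAltFalse (start target : String) (hnc : ¬ pvCompat start.toList target.toList) :
    canChange_alt start target = false := by
  unfold canChange_alt
  by_cases hf : start.toList.filter (fun c => c ≠ '_') = target.toList.filter (fun c => c ≠ '_')
  · rw [if_neg (show ¬ _ ≠ _ by simp only [ne_eq, not_not]; exact hf)]
    have hmap : (pvPcs start.toList 0).map Prod.fst = (pvPcs target.toList 0).map Prod.fst := by
      rw [pvMap_fst_pcs, pvMap_fst_pcs]; exact hf
    unfold pvCompat at hnc
    push Not at hnc
    have hlenp : (pvPcs target.toList 0).length ≤ (pvPcs start.toList 0).length := by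
      have := congrArg List.length hmap
      simp only [List.length_map] at this
      omega
    obtain ⟨pq, hmem, hb⟩ := hnc hlenp
    exact pvCnt_false_of_bad start.toList target.toList hmap pq hmem hb
  · rw [if_pos hf]

-- ===== VERDICT (by name: the statement is the Claim_ definition above) =====
theorem canChange_spec : Claim_equal_canChange := by
  intro start target _hdom hpre
  unfold Pre_canChange at hpre
  unfold Spec_canChange canChange
  rcases hpre with heq | ⟨hlt, hnc⟩
  · rw [PySem.Str.len_eq, PySem.Str.len_eq] at heq
    have hlen : start.toList.length = target.toList.length := by exact_mod_cast heq
    rw [pvAltEq start target hlen, PySem.Str.len_eq,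
      pvLoop_eq_match2 start.toList target.toList hlen _ 0 0 le_rfl le_rfl (by positivity)
        (by positivity) (by omega)]
    simp only [Int.toNat_zero, List.drop_zero]
  · rw [PySem.Str.len_eq, PySem.Str.len_eq] at hlt
    have hlen : target.toList.length < start.toList.length := by exact_mod_cast hlt
    rw [PySem.Str.len_eq,
      ← pvLoopGo_pad start.toList target.toList (start.toList.length - target.toList.length)
        (start.toList.length : Int) _ 0 0 le_rfl]
    have hlen2 : start.toList.length
        = (target.toList ++ List.replicate (start.toList.length - target.toList.length) ' ').length := by
      rw [List.length_append, List.length_replicate]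
      omega
    rw [pvLoop_eq_match2 start.toList _ hlen2 _ 0 0 le_rfl le_rfl (by positivity)
      (by positivity) (by omega)]
    simp only [Int.toNat_zero, List.drop_zero]
    rw [pvPcs_append, pvAltFalse start target hnc]
    unfold pvCompat at hnc
    push Not at hnc
    by_cases hl : (pvPcs target.toList 0).length ≤ (pvPcs start.toList 0).length
    · have hex : ∃ p ∈ (pvPcs start.toList 0).zip (pvPcs target.toList 0),
          ¬ pvOKPair p.1 p.2 := hnc hl
      rw [pvMatch2_false_of_badpair _ _ _ hex]
    · have hlen3 : (pvPcs start.toList 0).length < (pvPcs target.toList 0).length := by omega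
      rw [pvMatch2_false_of_longer _ _ _ hlen3]
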